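-- pv_equiv track=rewrite | github.com/efcunn/meclas | mecps.py | IndFETWave
-- ===== SOURCE A (Python) =====
-- def Hex2Byte(num):
--     return '{0:04x}'.format(int(num)%(0xffff+1))
--
-- def IndFETWave(ListOfPixels,WriteValue):
--     itt=0
--     NewString=''
--     while itt<140:
--         if (itt+1) in ListOfPixels:
--             NewString+=Hex2Byte(WriteValue)
--         else:
--             NewString+='0000'
--         itt+=1
--     return NewString
-- ===== SOURCE B (Python) =====
-- def Hex2Byte(num):
--     return '{0:04x}'.format(int(num)%(0xffff+1))
--
-- def IndFETWave(ListOfPixels, WriteValue):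
--     token = Hex2Byte(WriteValue)
--     slots = ['0000'] * 140
--     for p in ListOfPixels:
--         if 1 <= p <= 140:
--             slots[p - 1] = token
--     return ''.join(slots)
-- ===== Notes on version B (the rewrite author's own statement) =====
-- stated objective: faster
-- what changed: Instead of membership-testing each of the 140 positions against the pixel list (140 scans), B computes the hex token once and scatters it into a 140-slot array indexed by pixel, then joins.
import Mathlib
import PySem

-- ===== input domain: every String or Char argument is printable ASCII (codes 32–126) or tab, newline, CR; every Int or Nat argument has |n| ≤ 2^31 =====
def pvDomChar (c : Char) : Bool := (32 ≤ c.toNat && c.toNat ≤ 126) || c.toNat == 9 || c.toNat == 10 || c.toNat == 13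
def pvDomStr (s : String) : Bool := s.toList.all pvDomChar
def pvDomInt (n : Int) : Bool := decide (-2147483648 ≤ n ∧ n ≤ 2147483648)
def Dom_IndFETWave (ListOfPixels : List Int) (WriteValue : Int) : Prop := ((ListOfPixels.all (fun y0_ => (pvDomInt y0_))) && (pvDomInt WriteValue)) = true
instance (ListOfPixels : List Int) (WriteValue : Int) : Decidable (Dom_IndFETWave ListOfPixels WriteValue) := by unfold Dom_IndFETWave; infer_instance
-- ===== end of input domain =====

-- B computes the hex token once and scatters it into a 140-slot array indexed by pixel
-- (one pass over the list), instead of membership-testing the list for each of the 140 positions.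

-- ===== PORT A =====
-- '{0:04x}'.format(m) for 0 ≤ m ≤ 0xffff: four lowercase hex digits (exact on that range)
def hexDigit (n : Nat) : Char :=
  if n < 10 then Char.ofNat (48 + n) else Char.ofNat (87 + n)

def Hex2Byte (num : Int) : String :=
  let m := (PySem.Int.mod num 65536).toNat
  String.ofList [hexDigit (m / 4096 % 16), hexDigit (m / 256 % 16), hexDigit (m / 16 % 16), hexDigit (m % 16)]

-- while itt<140: append token or '0000'
def IndFETWave (ListOfPixels : List Int) (WriteValue : Int) : String :=
  (List.range 140).foldl
    (fun (NewString : String) (itt : Nat) =>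
      if ((itt : Int) + 1) ∈ ListOfPixels then NewString ++ Hex2Byte WriteValue
      else NewString ++ "0000")
    ""

-- ===== PORT B =====
def IndFETWave_alt (ListOfPixels : List Int) (WriteValue : Int) : String :=
  let token := Hex2Byte WriteValue
  let slots := List.replicate 140 "0000"
  let slots := ListOfPixels.foldl
    (fun sl p => if 1 ≤ p ∧ p ≤ 140 then sl.set (p - 1).toNat token else sl) slots
  String.join slots

-- ===== PRECONDITION & SPEC =====
def Spec_IndFETWave (ListOfPixels : List Int) (WriteValue : Int) (out : String) : Prop := out = IndFETWave_alt ListOfPixels WriteValue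
instance (ListOfPixels : List Int) (WriteValue : Int) (out : String) : Decidable (Spec_IndFETWave ListOfPixels WriteValue out) := by unfold Spec_IndFETWave; infer_instance

-- ===== CLAIM (what is proved, stated in full; the proofs are below) =====
def Claim_equal_IndFETWave : Prop := ∀ (ListOfPixels : List Int) (WriteValue : Int), Dom_IndFETWave ListOfPixels WriteValue → Spec_IndFETWave ListOfPixels WriteValue (IndFETWave ListOfPixels WriteValue)

-- ===== LEMMAS AND PROOFS =====

theorem foldl_join_aux (l : List String) (s : String) :
    l.foldl (· ++ ·) s = s ++ l.foldl (· ++ ·) "" := by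
  induction l generalizing s with
  | nil => simp
  | cons a l ih =>
    simp only [List.foldl_cons, String.empty_append]
    rw [ih (s ++ a), ih a, String.append_assoc]

theorem join_cons (a : String) (l : List String) :
    String.join (a :: l) = a ++ String.join l := by
  simp only [String.join, List.foldl_cons, String.empty_append]
  exact foldl_join_aux l a

-- A's left fold of appends = join of the mapped range
theorem foldl_append_join (g : Nat → String) (xs : List Nat) (s : String) :
    xs.foldl (fun acc i => acc ++ g i) s = s ++ String.join (xs.map g) := by
  induction xs generalizing s with
  | nil => simp [String.join]
  | cons x xs ih =>
    simp only [List.foldl_cons, List.map_cons]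
    rw [ih, join_cons, String.append_assoc]

-- the scatter fold, pointwise
theorem scatter_get (tok : String) (L : List Int) (sl : List String) (i : Nat)
    (hlen : sl.length = 140) :
    (L.foldl (fun sl p => if 1 ≤ p ∧ p ≤ 140 then sl.set (p - 1).toNat tok else sl) sl)[i]? =
      if ((i : Int) + 1) ∈ L ∧ i < 140 then some tok else sl[i]? := by
  induction L generalizing sl with
  | nil => simp
  | cons p L ih =>
    simp only [List.foldl_cons, List.mem_cons]
    by_cases hp : 1 ≤ p ∧ p ≤ 140
    · rw [if_pos hp, ih _ (by simpa using hlen)]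
      by_cases hpi : (i : Int) + 1 = p
      · have hidx : ((p - 1).toNat : Nat) = i := by omega
        have hi : i < 140 := by omega
        by_cases hm : ((i : Int) + 1) ∈ L
        · rw [if_pos ⟨hm, hi⟩, if_pos ⟨Or.inr hm, hi⟩]
        · rw [if_neg (by tauto), if_pos ⟨Or.inl hpi, hi⟩, List.getElem?_set, hidx,
            if_pos rfl, if_pos (by omega)]
      · have hset : (sl.set (p - 1).toNat tok)[i]? = sl[i]? := by
          rw [List.getElem?_set, if_neg (by omega : ¬ ((p - 1).toNat = i))]
        rw [hset]
        by_cases hm : ((i : Int) + 1) ∈ L ∧ i < 140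
        · rw [if_pos hm, if_pos ⟨Or.inr hm.1, hm.2⟩]
        · rw [if_neg hm, if_neg (by tauto)]
    · rw [if_neg hp, ih _ hlen]
      by_cases hm : ((i : Int) + 1) ∈ L ∧ i < 140
      · rw [if_pos hm, if_pos ⟨Or.inr hm.1, hm.2⟩]
      · rw [if_neg hm, if_neg ?_]
        rintro ⟨h1 | h1, h2⟩
        · omega
        · exact hm ⟨h1, h2⟩

theorem IndFETWave_eq_alt (L : List Int) (W : Int) :
    IndFETWave L W = IndFETWave_alt L W := by
  unfold IndFETWave IndFETWave_alt
  have hsplit : ∀ (s : String) (itt : Nat),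
      (if ((itt : Int) + 1) ∈ L then s ++ Hex2Byte W else s ++ "0000") =
        s ++ (if ((itt : Int) + 1) ∈ L then Hex2Byte W else "0000") := by
    intro s itt; split_ifs <;> rfl
  simp only [hsplit]
  rw [foldl_append_join (fun itt => if ((itt : Int) + 1) ∈ L then Hex2Byte W else "0000")]
  rw [String.empty_append]
  apply congrArg String.join
  apply List.ext_getElem?
  intro i
  rw [scatter_get _ _ _ _ (by simp)]
  by_cases hi : i < 140
  · simp only [List.getElem?_map, List.getElem?_range, hi, if_pos,
      List.getElem?_replicate]
    by_cases hm : ((i : Int) + 1) ∈ L <;> simp [hm]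
  · simp [hi]

-- ===== VERDICT (by name: the statement is the Claim_ definition above) =====
theorem IndFETWave_spec : Claim_equal_IndFETWave := by
  intro L W _
  exact IndFETWave_eq_alt L W
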